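-- pv_equiv track=rewrite | github.com/kiadoucette/COSC1010 | File-Encryption-and-Decryption/main.py | decryptedMessage
-- ===== SOURCE A (Python) =====
-- def decryptedMessage(content, reverse_codes):
--
--     # Creating variable for the decrypted content
--     decrypted_content = ''
--     # Index variable
--     i = 0
--     while i < len(content):
--
--         # checking each potential encrypted symbol in the content
--         for code, char in reverse_codes.items():
--
--             # Check if the current part of the content matches the code in the dictionary
--             if content[i:i+len(code)] == code:
--                 decrypted_content += char
--
--                 # Move index past the decrypted symbol
--                 i += len(code)
--                 break
--
--         else:
--             # If no match, just add the character (for things like spaces)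
--             decrypted_content += content[i]
--             i += 1
--
--     return decrypted_content
-- ===== SOURCE B (Python) =====
-- def decryptedMessage(content, reverse_codes):
--     # Index each code once: code -> (insertion index, decoded char); collect distinct code lengths.
--     info = {}
--     lengths = []
--     for idx, (code, char) in enumerate(reverse_codes.items()):
--         info[code] = (idx, char)
--         if len(code) not in lengths:
--             lengths.append(len(code))
--     pieces = []
--     i = 0
--     n = len(content)
--     while i < n:
--         best = None
--         for L in lengths:
--             seg = content[i:i+L]
--             if len(seg) == L:
--                 hit = info.get(seg)
--                 if hit is not None and (best is None or hit[0] < best[0]):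
--                     best = (hit[0], hit[1], L)
--         if best is None:
--             pieces.append(content[i])
--             i += 1
--         else:
--             pieces.append(best[1])
--             i += best[2]
--     return ''.join(pieces)
-- ===== Notes on version B (the rewrite author's own statement) =====
-- stated objective: faster
-- what changed: A rescans every dictionary entry at every position, comparing a slice per code; B builds a code->(insertion index, char) hash index and the list of distinct code lengths once, then at each position does one hash lookup per distinct length and keeps the earliest-inserted match.
import Mathlib
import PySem

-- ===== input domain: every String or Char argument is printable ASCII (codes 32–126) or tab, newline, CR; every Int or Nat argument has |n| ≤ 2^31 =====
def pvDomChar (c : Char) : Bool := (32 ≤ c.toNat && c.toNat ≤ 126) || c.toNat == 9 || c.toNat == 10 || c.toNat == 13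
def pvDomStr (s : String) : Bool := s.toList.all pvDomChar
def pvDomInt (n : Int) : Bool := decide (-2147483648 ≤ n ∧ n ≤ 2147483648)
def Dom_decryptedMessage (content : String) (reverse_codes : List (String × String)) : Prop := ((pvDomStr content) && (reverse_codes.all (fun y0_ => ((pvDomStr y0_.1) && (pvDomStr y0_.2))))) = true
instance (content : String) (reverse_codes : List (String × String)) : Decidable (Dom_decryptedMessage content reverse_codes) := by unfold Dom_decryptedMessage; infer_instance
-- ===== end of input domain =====

-- B replaces A's per-position scan of the whole code dictionary by a code→(index,char) hash index
-- consulted once per distinct code length (objective: faster, fewer comparisons per position).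
-- Equality is about the RETURN value; neither program mutates its arguments.

-- ===== PORT A =====
-- the condition 'content[i:i+len(code)] == code' (abbrev: decidability is inherited from list equality)
abbrev pvMatch (cs : List Char) (i : Nat) (p : String × String) : Prop :=
  PySem.List.slice cs (some (i : Int)) (some ((i : Int) + (p.1.toList.length : Int))) = p.1.toList

-- the inner 'for code, char in reverse_codes.items(): if … break / else' search
def pvFindA (cs : List Char) (i : Nat) : List (String × String) → Option (String × String)
  | [] => none
  | p :: rest => if pvMatch cs i p then some p else pvFindA cs i rest

-- the 'while i < len(content)' loop; fuel = len(content) bounds the number of iterations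
def pvLoopA (cs : List Char) (items : List (String × String)) :
    Nat → Nat → List Char → List Char
  | 0, _, acc => acc
  | fuel + 1, i, acc =>
    if h : i < cs.length then
      match pvFindA cs i items with
      | some (code, ch) => pvLoopA cs items fuel (i + code.toList.length) (acc ++ ch.toList)
      | none => pvLoopA cs items fuel (i + 1) (acc ++ [cs[i]])
    else acc

def decryptedMessage (content : String) (reverse_codes : List (String × String)) : String :=
  String.ofList (pvLoopA content.toList (PySem.Dict.ofList reverse_codes).items
    content.toList.length 0 [])

-- ===== PORT B =====
-- 'info[code] = (idx, char)' built over enumerate(reverse_codes.items())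
def pvInfoOf (ps : List (String × String)) : PySem.Dict String (Int × String) :=
  (PySem.List.enumerate ps 0).foldl (fun m p => m.insert p.2.1 (p.1, p.2.2)) PySem.Dict.empty

-- 'if len(code) not in lengths: lengths.append(len(code))'
def pvLengthsOf (ps : List (String × String)) : List Nat :=
  ps.foldl (fun ls p => if p.1.toList.length ∈ ls then ls else ls ++ [p.1.toList.length]) []

-- body of 'for L in lengths: …' updating best
def pvBestStep (cs : List Char) (i : Nat) (info : PySem.Dict String (Int × String))
    (best : Option (Int × String × Nat)) (L : Nat) : Option (Int × String × Nat) :=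
  let seg := PySem.List.slice cs (some (i : Int)) (some ((i : Int) + (L : Int)))
  if seg.length = L then
    match info.get? (String.ofList seg) with
    | some (idx, ch) =>
      match best with
      | none => some (idx, ch, L)
      | some b => if idx < b.1 then some (idx, ch, L) else best
    | none => best
  else best

-- the 'while i < n' loop of B; same fuel bound
def pvLoopB (cs : List Char) (info : PySem.Dict String (Int × String)) (lengths : List Nat) :
    Nat → Nat → List Char → List Char
  | 0, _, acc => acc
  | fuel + 1, i, acc =>
    if h : i < cs.length then
      match lengths.foldl (pvBestStep cs i info) none with
      | some (_, ch, L) => pvLoopB cs info lengths fuel (i + L) (acc ++ ch.toList)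
      | none => pvLoopB cs info lengths fuel (i + 1) (acc ++ [cs[i]])
    else acc

def decryptedMessage_alt (content : String) (reverse_codes : List (String × String)) : String :=
  let items := (PySem.Dict.ofList reverse_codes).items
  String.ofList (pvLoopB content.toList (pvInfoOf items) (pvLengthsOf items)
    content.toList.length 0 [])

-- ===== PRECONDITION & SPEC =====
-- no Pre_: the two ports agree on every input (both loops run in step, with the same
-- iteration bound, so they agree even where the Pythons would loop forever on an empty code)
def Spec_decryptedMessage (content : String) (reverse_codes : List (String × String)) (out : String) : Prop := out = decryptedMessage_alt content reverse_codes
instance (content : String) (reverse_codes : List (String × String)) (out : String) : Decidable (Spec_decryptedMessage content reverse_codes out) := by unfold Spec_decryptedMessage; infer_instance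

-- ===== CLAIM (what is proved, stated in full; the proofs are below) =====
def Claim_equal_decryptedMessage : Prop := ∀ (content : String) (reverse_codes : List (String × String)), Dom_decryptedMessage content reverse_codes → Spec_decryptedMessage content reverse_codes (decryptedMessage content reverse_codes)

-- ===== LEMMAS AND PROOFS =====

-- one candidate: pvBestStep applied to the empty best
def pvCand (cs : List Char) (i : Nat) (info : PySem.Dict String (Int × String)) (L : Nat) :
    Option (Int × String × Nat) := pvBestStep cs i info none L

-- A's inner search is List.find?
theorem pvFindA_eq_find? (cs : List Char) (i : Nat) (ps : List (String × String)) :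
    pvFindA cs i ps = ps.find? (fun p => decide (pvMatch cs i p)) := by
  induction ps with
  | nil => rfl
  | cons p rest ih =>
    rw [List.find?_cons]
    by_cases h : pvMatch cs i p
    · rw [pvFindA, if_pos h, decide_eq_true h]
    · rw [pvFindA, if_neg h, ih, decide_eq_false h]

-- membership in the lengths list, generalized over the accumulator
theorem pvMem_lengths_gen (ps : List (String × String)) (x : Nat) : ∀ (ls : List Nat),
    (x ∈ ps.foldl (fun ls p => if p.1.toList.length ∈ ls then ls else ls ++ [p.1.toList.length]) ls
      ↔ x ∈ ls ∨ ∃ p ∈ ps, p.1.toList.length = x) := by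
  induction ps with
  | nil => simp
  | cons p rest ih =>
    intro ls
    simp only [List.foldl_cons]
    by_cases h : p.1.toList.length ∈ ls
    · simp only [if_pos h, ih]
      constructor
      · rintro (hl | hp)
        · exact Or.inl hl
        · exact Or.inr (by simpa using Or.inr hp)
      · rintro (hl | hp)
        · exact Or.inl hl
        · rcases (by simpa using hp : p.1.toList.length = x ∨ ∃ q ∈ rest, q.1.toList.length = x) with he | hq
          · exact Or.inl (he ▸ h)
          · exact Or.inr hq
    · simp only [if_neg h, ih, List.mem_append, List.mem_singleton]
      constructor
      · rintro ((hl | he) | hp)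
        · exact Or.inl hl
        · exact Or.inr ⟨p, by simp, he.symm⟩
        · obtain ⟨q, hq, hqe⟩ := hp; exact Or.inr ⟨q, by simp [hq], hqe⟩
      · rintro (hl | hq)
        · exact Or.inl (Or.inl hl)
        · rcases (by simpa using hq : p.1.toList.length = x ∨ ∃ q ∈ rest, q.1.toList.length = x) with he | hq'
          · exact Or.inl (Or.inr he.symm)
          · obtain ⟨q, hq2, hqe⟩ := hq'; exact Or.inr ⟨q, by simp [hq2], hqe⟩
-- membership in the lengths list
theorem pvMem_lengths (ps : List (String × String)) (x : Nat) :
    x ∈ pvLengthsOf ps ↔ ∃ p ∈ ps, p.1.toList.length = x := by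
  simpa using pvMem_lengths_gen ps x []
-- items of the info dictionary, generalized over start index and seed dictionary
theorem pvInfo_items_gen (ps : List (String × String)) : ∀ (s0 : Int)
    (m : PySem.Dict String (Int × String)),
    (∀ p ∈ ps, m.contains p.1 = false) → (ps.map (·.1)).Nodup →
    ((PySem.List.enumerate ps s0).foldl (fun m p => m.insert p.2.1 (p.1, p.2.2)) m).items
      = m.items ++ (PySem.List.enumerate ps s0).map (fun p => (p.2.1, (p.1, p.2.2))) := by
  induction ps with
  | nil => intro s0 m _ _; simp [PySem.List.enumerate]
  | cons p rest ih =>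
    intro s0 m hm hnd
    have hnd2 : (p.1 :: rest.map (·.1)).Nodup := by rw [List.map_cons] at hnd; exact hnd
    obtain ⟨hp1, hnd'⟩ := List.nodup_cons.mp hnd2
    rw [PySem.List.enumerate_cons]
    simp only [List.foldl_cons, List.map_cons]
    have hfresh : m.contains p.1 = false := hm p (by simp)
    have hstep : ∀ q ∈ rest, (m.insert p.1 (s0, p.2)).contains q.1 = false := by
      intro q hq
      rw [PySem.Dict.contains_insert]
      have h1 : q.1 ≠ p.1 := fun he => hp1 (he ▸ List.mem_map.mpr ⟨q, hq, rfl⟩)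
      simp [h1, hm q (by simp [hq])]
    rw [ih (s0 + 1) _ hstep hnd']
    rw [PySem.Dict.items_insert_of_not_contains _ _ hfresh]
    simp
-- items and keys of the info dictionary
theorem pvInfo_items (ps : List (String × String)) (h : (ps.map (·.1)).Nodup) :
    (pvInfoOf ps).items = (PySem.List.enumerate ps 0).map (fun p => (p.2.1, (p.1, p.2.2))) := by
  have := pvInfo_items_gen ps 0 PySem.Dict.empty (by simp) h
  unfold pvInfoOf
  rw [this]
  simp [PySem.Dict.empty]
theorem pvInfo_keys (ps : List (String × String)) (h : (ps.map (·.1)).Nodup) :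
    (pvInfoOf ps).keys = ps.map (·.1) := by
  show ((pvInfoOf ps).items).map (·.1) = _
  rw [pvInfo_items ps h]
  rw [List.map_map]
  have : ((fun x => x.1) ∘ fun p => (p.2.1, p.1, p.2.2) : Int × String × String → String)
      = (fun x => x.1) ∘ (fun p : Int × (String × String) => p.2) := rfl
  rw [this, ← List.map_map, PySem.List.map_snd_enumerate]
-- get? on the info dictionary
theorem pvInfo_get? (ps : List (String × String)) (h : (ps.map (·.1)).Nodup)
    (s : String) (j : Int) (ch : String) :
    (pvInfoOf ps).get? s = some (j, ch) ↔
      ∃ k, ∃ _ : k < ps.length, j = (k : Int) ∧ ps[k] = (s, ch) := by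
  rw [PySem.Dict.get?_eq_some_iff_mem_items _ _ _ (by rw [pvInfo_keys ps h]; exact h)]
  rw [pvInfo_items ps h]
  rw [List.mem_map]
  constructor
  · rintro ⟨q, hq, he⟩
    rw [PySem.List.mem_enumerate_iff] at hq
    obtain ⟨k, hk, rfl⟩ := hq
    refine ⟨k, hk, ?_, ?_⟩
    · simpa using congrArg (·.2.1) he |>.symm
    · have h1 : ps[k].1 = s := congrArg (·.1) he
      have h2 : ps[k].2 = ch := congrArg (·.2.2) he
      exact Prod.ext h1 h2
  · rintro ⟨k, hk, rfl, hps⟩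
    refine ⟨((k : Int), ps[k]), ?_, ?_⟩
    · rw [PySem.List.mem_enumerate_iff]; exact ⟨k, hk, by simp⟩
    · simp [hps]

-- one fold step merges the candidate of L into the current best
theorem pvBestStep_merge (cs : List Char) (i : Nat) (info : PySem.Dict String (Int × String))
    (best : Option (Int × String × Nat)) (L : Nat) :
    pvBestStep cs i info best L =
      match pvCand cs i info L with
      | none => best
      | some y => match best with
                  | none => some y
                  | some b => if y.1 < b.1 then some y else best := by
  unfold pvCand pvBestStep
  dsimp only
  split_ifs with hL
  · cases hget : (info.get? (String.ofList (PySem.List.slice cs (some (i : Int)) (some ((i : Int) + (L : Int)))))) with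
    | none => cases best <;> simp
    | some v => cases best <;> simp
  · cases best <;> simp

-- a candidate is a matching item
theorem pvCand_char (cs : List Char) (i : Nat) (ps : List (String × String))
    (h : (ps.map (·.1)).Nodup) (L : Nat) (z : Int × String × Nat)
    (hz : pvCand cs i (pvInfoOf ps) L = some z) :
    ∃ k, ∃ hk : k < ps.length, z.1 = (k : Int) ∧ pvMatch cs i ps[k] ∧
      z.2.1 = ps[k].2 ∧ z.2.2 = ps[k].1.toList.length ∧ L = ps[k].1.toList.length := by
  unfold pvCand pvBestStep at hz
  dsimp only at hz
  set seg := PySem.List.slice cs (some (i : Int)) (some ((i : Int) + (L : Int))) with hseg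
  by_cases hL : seg.length = L
  · rw [if_pos hL] at hz
    cases hget : (pvInfoOf ps).get? (String.ofList seg) with
    | none => rw [hget] at hz; simp at hz
    | some v =>
      rw [hget] at hz
      obtain ⟨idx, ch⟩ := v
      simp only [Option.some.injEq] at hz
      obtain ⟨k, hk, hj, hps⟩ := (pvInfo_get? ps h _ idx ch).mp hget
      have hkey : ps[k].1 = String.ofList seg := congrArg (·.1) hps
      have hlist : ps[k].1.toList = seg := by rw [hkey]; simp
      have hlen : ps[k].1.toList.length = L := by rw [hlist]; exact hL
      refine ⟨k, hk, ?_, ?_, ?_, ?_, hlen.symm⟩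
      · rw [← hz]; exact hj
      · unfold pvMatch; rw [hlen, hlist, ← hseg]
      · rw [← hz]; exact (congrArg (·.2) hps).symm
      · rw [← hz]; exact hlen.symm
  · rw [if_neg hL] at hz; simp at hz
-- a matching item yields its candidate
theorem pvCand_of_match (cs : List Char) (i : Nat) (ps : List (String × String))
    (h : (ps.map (·.1)).Nodup) (k : Nat) (hk : k < ps.length) (hm : pvMatch cs i ps[k]) :
    pvCand cs i (pvInfoOf ps) ps[k].1.toList.length
      = some ((k : Int), ps[k].2, ps[k].1.toList.length) := by
  unfold pvMatch at hm
  unfold pvCand pvBestStep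
  dsimp only
  rw [hm]
  rw [if_pos rfl]
  have hget : (pvInfoOf ps).get? (String.ofList ps[k].1.toList) = some ((k : Int), ps[k].2) := by
    rw [(pvInfo_get? ps h _ _ _)]
    exact ⟨k, hk, rfl, by simp⟩
  rw [hget]

-- fold invariant: a none result means no candidates; a some result is a minimal candidate
theorem pvFold_invariant (cs : List Char) (i : Nat) (info : PySem.Dict String (Int × String))
    (ls : List Nat) : ∀ (acc : Option (Int × String × Nat)),
    (ls.foldl (pvBestStep cs i info) acc = none →
        acc = none ∧ ∀ L ∈ ls, pvCand cs i info L = none) ∧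
    (∀ z, ls.foldl (pvBestStep cs i info) acc = some z →
        (acc = some z ∨ ∃ L ∈ ls, pvCand cs i info L = some z) ∧
        (∀ y, acc = some y → z.1 ≤ y.1) ∧
        (∀ L ∈ ls, ∀ y, pvCand cs i info L = some y → z.1 ≤ y.1)) := by
  induction ls with
  | nil =>
    intro acc
    simp only [List.foldl_nil]
    refine ⟨fun h => ⟨h, by simp⟩, fun z hz => ⟨Or.inl hz, fun y hy => ?_, by simp⟩⟩
    rw [hz] at hy
    injection hy with h
    exact (congrArg (·.1) h).le
  | cons L0 rest ih =>
    intro acc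
    simp only [List.foldl_cons]
    have hstep := pvBestStep_merge cs i info acc L0
    constructor
    · intro hnone
      obtain ⟨hacc', hrest⟩ := (ih (pvBestStep cs i info acc L0)).1 hnone
      rw [hstep] at hacc'
      cases hc : pvCand cs i info L0 with
      | none =>
        rw [hc] at hacc'
        refine ⟨hacc', ?_⟩
        intro L hL
        rcases List.mem_cons.mp hL with rfl | hL'
        · exact hc
        · exact hrest L hL'
      | some y =>
        rw [hc] at hacc'
        cases acc with
        | none => dsimp only at hacc'; exact absurd hacc' (by simp)
        | some b =>
          dsimp only at hacc'
          split at hacc' <;> exact absurd hacc' (by simp)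
    · intro z hz
      obtain ⟨hsrc, hmin_acc, hmin_rest⟩ := (ih (pvBestStep cs i info acc L0)).2 z hz
      rw [hstep] at hsrc hmin_acc
      cases hc : pvCand cs i info L0 with
      | none =>
        rw [hc] at hsrc hmin_acc
        refine ⟨?_, hmin_acc, ?_⟩
        · rcases hsrc with h1 | h1
          · exact Or.inl h1
          · exact Or.inr (by obtain ⟨L, hL, he⟩ := h1; exact ⟨L, by simp [hL], he⟩)
        · intro L hL y hy
          rcases List.mem_cons.mp hL with rfl | hL'
          · rw [hc] at hy; simp at hy
          · exact hmin_rest L hL' y hy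
      | some c =>
        rw [hc] at hsrc hmin_acc
        cases acc with
        | none =>
          dsimp only at hsrc hmin_acc
          refine ⟨?_, ?_, ?_⟩
          · rcases hsrc with h1 | h1
            · exact Or.inr ⟨L0, by simp, by rw [hc, ← h1]⟩
            · exact Or.inr (by obtain ⟨L, hL, he⟩ := h1; exact ⟨L, by simp [hL], he⟩)
          · intro y hy; simp at hy
          · intro L hL y hy
            rcases List.mem_cons.mp hL with rfl | hL'
            · rw [hc] at hy
              have : c = y := by simpa using hy
              subst this
              exact hmin_acc c rfl
            · exact hmin_rest L hL' y hy
        | some b =>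
          dsimp only at hsrc hmin_acc
          by_cases hlt : c.1 < b.1
          · rw [if_pos hlt] at hsrc hmin_acc
            refine ⟨?_, ?_, ?_⟩
            · rcases hsrc with h1 | h1
              · exact Or.inr ⟨L0, by simp, by rw [hc, ← h1]⟩
              · exact Or.inr (by obtain ⟨L, hL, he⟩ := h1; exact ⟨L, by simp [hL], he⟩)
            · intro y hy
              have : b = y := by simpa using hy
              subst this
              have := hmin_acc c rfl
              omega
            · intro L hL y hy
              rcases List.mem_cons.mp hL with rfl | hL'
              · rw [hc] at hy
                have : c = y := by simpa using hy
                subst this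
                exact hmin_acc c rfl
              · exact hmin_rest L hL' y hy
          · rw [if_neg hlt] at hsrc hmin_acc
            refine ⟨?_, ?_, ?_⟩
            · rcases hsrc with h1 | h1
              · exact Or.inl h1
              · exact Or.inr (by obtain ⟨L, hL, he⟩ := h1; exact ⟨L, by simp [hL], he⟩)
            · exact hmin_acc
            · intro L hL y hy
              rcases List.mem_cons.mp hL with rfl | hL'
              · rw [hc] at hy
                have hcy : c = y := by simpa using hy
                subst hcy
                have := hmin_acc b rfl
                omega
              · exact hmin_rest L hL' y hy

-- the main step equivalence: B's best-candidate fold computes A's first match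
theorem pvStep_equiv (cs : List Char) (i : Nat) (ps : List (String × String))
    (h : (ps.map (·.1)).Nodup) :
    ((pvLengthsOf ps).foldl (pvBestStep cs i (pvInfoOf ps)) none).map (fun y => (y.2.1, y.2.2))
      = (pvFindA cs i ps).map (fun p => (p.2, p.1.toList.length)) := by
  rw [pvFindA_eq_find?]
  cases hf : ps.find? (fun p => decide (pvMatch cs i p)) with
  | none =>
    have hno : ∀ p ∈ ps, ¬ pvMatch cs i p := by
      intro p hp
      have := List.find?_eq_none.mp hf p hp
      simpa using this
    cases hr : (pvLengthsOf ps).foldl (pvBestStep cs i (pvInfoOf ps)) none with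
    | none => simp
    | some z =>
      exfalso
      obtain ⟨hsrc, _, _⟩ := (pvFold_invariant cs i (pvInfoOf ps) (pvLengthsOf ps) none).2 z hr
      rcases hsrc with h1 | ⟨L, _, hcand⟩
      · exact absurd h1 (by simp)
      · obtain ⟨k, hk, _, hmk, _⟩ := pvCand_char cs i ps h L z hcand
        exact hno ps[k] (List.getElem_mem hk) hmk
  | some q =>
    obtain ⟨hq, k0, hk0, hqk, hmin0⟩ := List.find?_eq_some_iff_getElem.mp hf
    have hmq : pvMatch cs i ps[k0] := by rw [hqk]; simpa using hq
    have hc0 := pvCand_of_match cs i ps h k0 hk0 hmq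
    have hmem : ps[k0].1.toList.length ∈ pvLengthsOf ps :=
      (pvMem_lengths ps _).mpr ⟨ps[k0], List.getElem_mem hk0, rfl⟩
    cases hr : (pvLengthsOf ps).foldl (pvBestStep cs i (pvInfoOf ps)) none with
    | none =>
      exfalso
      obtain ⟨_, hall⟩ := (pvFold_invariant cs i (pvInfoOf ps) (pvLengthsOf ps) none).1 hr
      rw [hall _ hmem] at hc0
      exact absurd hc0 (by simp)
    | some z =>
      obtain ⟨hsrc, _, hminr⟩ := (pvFold_invariant cs i (pvInfoOf ps) (pvLengthsOf ps) none).2 z hr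
      rcases hsrc with h1 | ⟨L, _, hcand⟩
      · exact absurd h1 (by simp)
      · obtain ⟨k, hk, hz1, hmk, hz21, hz22, _⟩ := pvCand_char cs i ps h L z hcand
        have hle : z.1 ≤ (k0 : Int) := hminr _ hmem _ hc0
        have hk0k : k0 ≤ k := by
          by_contra hlt
          have hx := hmin0 k (by omega)
          simp only [Bool.not_eq_true', decide_eq_false_iff_not] at hx
          exact hx hmk
        have hkk0 : k = k0 := by omega
        subst hkk0
        rw [← hqk]
        simp only [Option.map_some, Option.some.injEq]
        exact Prod.ext hz21 hz22

-- the two loops agree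
theorem pvLoop_equiv (cs : List Char) (ps : List (String × String))
    (h : (ps.map (·.1)).Nodup) : ∀ (fuel i : Nat) (acc : List Char),
    pvLoopA cs ps fuel i acc = pvLoopB cs (pvInfoOf ps) (pvLengthsOf ps) fuel i acc := by
  intro fuel
  induction fuel with
  | zero => intro i acc; rfl
  | succ n ih =>
    intro i acc
    rw [pvLoopA, pvLoopB]
    by_cases hlt : i < cs.length
    · rw [dif_pos hlt, dif_pos hlt]
      have hstep := pvStep_equiv cs i ps h
      cases hf : pvFindA cs i ps with
      | none =>
        rw [hf] at hstep
        have hr : (pvLengthsOf ps).foldl (pvBestStep cs i (pvInfoOf ps)) none = none := by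
          cases hr' : (pvLengthsOf ps).foldl (pvBestStep cs i (pvInfoOf ps)) none with
          | none => rfl
          | some z => rw [hr'] at hstep; simp at hstep
        rw [hr]
        exact ih (i + 1) (acc ++ [cs[i]])
      | some q =>
        obtain ⟨code, ch⟩ := q
        rw [hf] at hstep
        cases hr' : (pvLengthsOf ps).foldl (pvBestStep cs i (pvInfoOf ps)) none with
        | none => rw [hr'] at hstep; simp at hstep
        | some z =>
          rw [hr'] at hstep
          simp only [Option.map_some, Option.some.injEq] at hstep
          have h1 : z.2.1 = ch := congrArg (·.1) hstep
          have h2 : z.2.2 = code.toList.length := congrArg (·.2) hstep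
          obtain ⟨zj, zch, zL⟩ := z
          simp only at h1 h2
          subst h1 h2
          exact ih _ _
    · rw [dif_neg hlt, dif_neg hlt]

-- ===== VERDICT (by name: the statement is the Claim_ definition above) =====
theorem decryptedMessage_spec : Claim_equal_decryptedMessage := by
  intro content reverse_codes _
  unfold Spec_decryptedMessage decryptedMessage decryptedMessage_alt
  have h : (((PySem.Dict.ofList reverse_codes).items).map (·.1)).Nodup := by
    have := PySem.Dict.nodup_keys_ofList (κ := String) (ν := String) reverse_codes
    simpa [PySem.Dict.keys] using this
  rw [pvLoop_equiv _ _ h]
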